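-- pv_equiv track=rewrite | github.com/Jaka1504/Tsuro | model.py | zasifriraj_geslo
-- ===== SOURCE A (Python) =====
-- def zasifriraj_geslo(geslo_v_cistopisu: str):
--     """Vrne celo število, iz katerega ni moč enostavno razbrati
--     vnesenega `geslo_v_cistopisu`."""
--     zaporedje = "QWERTZUIOPŠĐASDFGHJKLČĆŽYXCVBNMqwertzuiopšđasdfghjklčćžyxcvbnm 0123456789.,_<>!#&%$()[]-@€ß"
--     for znak in geslo_v_cistopisu:
--         if not znak in zaporedje:
--             geslo_v_cistopisu = geslo_v_cistopisu.replace(znak, "ß")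
--     return sum(
--         [
--             2 ** zaporedje.index(geslo_v_cistopisu[indeks_znaka])
--             * 3**indeks_znaka
--             for indeks_znaka in range(len(geslo_v_cistopisu))
--         ]
--     )
-- ===== SOURCE B (Python) =====
-- def zasifriraj_geslo(geslo_v_cistopisu: str):
--     """Vrne celo število, iz katerega ni moč enostavno razbrati
--     vnesenega `geslo_v_cistopisu`."""
--     zaporedje = "QWERTZUIOPŠĐASDFGHJKLČĆŽYXCVBNMqwertzuiopšđasdfghjklčćžyxcvbnm 0123456789.,_<>!#&%$()[]-@€ß"
--     privzeti_indeks = len(zaporedje) - 1  # index of 'ß'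
--     vsota = 0
--     pot3 = 1
--     for znak in geslo_v_cistopisu:
--         indeks = zaporedje.index(znak) if znak in zaporedje else privzeti_indeks
--         vsota += 2 ** indeks * pot3
--         pot3 *= 3
--     return vsota
-- ===== Notes on version B (the rewrite author's own statement) =====
-- stated objective: faster
-- what changed: B drops A's replace-based sanitization pass (a full-string replace per out-of-alphabet character) and A's indexed list comprehension with 3**i recomputed per term, doing one fold over the original characters with a running power-of-3 accumulator and a per-character index (alphabet index, or the index of the trailing 'ß' when absent).
import Mathlib
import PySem

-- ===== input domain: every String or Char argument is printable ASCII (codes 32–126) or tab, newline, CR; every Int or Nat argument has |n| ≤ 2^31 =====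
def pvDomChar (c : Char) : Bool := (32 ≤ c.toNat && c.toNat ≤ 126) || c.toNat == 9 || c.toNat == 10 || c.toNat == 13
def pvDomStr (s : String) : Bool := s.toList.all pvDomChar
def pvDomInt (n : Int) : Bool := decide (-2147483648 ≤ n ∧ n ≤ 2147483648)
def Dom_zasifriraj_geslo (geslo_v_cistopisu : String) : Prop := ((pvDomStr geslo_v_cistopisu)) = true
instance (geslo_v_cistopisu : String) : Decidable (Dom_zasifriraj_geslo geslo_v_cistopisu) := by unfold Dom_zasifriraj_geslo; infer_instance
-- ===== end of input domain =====

-- B replaces A's replace-based sanitization pass + indexed list comprehension by a single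
-- fold over the characters keeping a running power of 3 (objective: alternative decomposition).

-- the alphabet literal both Python versions contain
def pvZaporedje : List Char :=
  "QWERTZUIOPŠĐASDFGHJKLČĆŽYXCVBNMqwertzuiopšđasdfghjklčćžyxcvbnm 0123456789.,_<>!#&%$()[]-@€ß".toList

-- ===== PORT A =====
-- `for znak in geslo_v_cistopisu` iterates the ORIGINAL string object even though the
-- variable is rebound inside, so the fold runs over g.toList with the rebound string as
-- accumulator.  `zaporedje.index(c)` = Chars.find (never raises here: every char not in
-- zaporedje was replaced by 'ß' ∈ zaporedje, so find ≥ 0 and .toNat is exact);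
-- geslo_v_cistopisu[indeks_znaka] is in range, so pyGetD is exact.
def zasifriraj_geslo (geslo_v_cistopisu : String) : Int :=
  let s : List Char := geslo_v_cistopisu.toList.foldl
    (fun acc znak =>
      if PySem.Chars.isIn [znak] pvZaporedje then acc
      else PySem.Chars.replace acc [znak] ['ß'])
    geslo_v_cistopisu.toList
  ((PySem.List.pyRange 0 (PySem.List.len s) 1).map
    (fun indeks_znaka =>
      (2 : Int) ^ (PySem.Chars.find pvZaporedje [PySem.List.pyGetD s indeks_znaka ' ']).toNat
        * 3 ^ indeks_znaka.toNat)).sum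

-- ===== PORT B =====
-- single pass: state (vsota, pot3); `zaporedje.index(znak)` = Chars.find (the membership
-- test just succeeded, so find ≥ 0 and .toNat is exact)
def zasifriraj_geslo_alt (geslo_v_cistopisu : String) : Int :=
  let privzeti_indeks : Nat := pvZaporedje.length - 1
  (geslo_v_cistopisu.toList.foldl
    (fun (st : Int × Int) znak =>
      let indeks : Nat :=
        if PySem.Chars.isIn [znak] pvZaporedje then (PySem.Chars.find pvZaporedje [znak]).toNat
        else privzeti_indeks
      (st.1 + 2 ^ indeks * st.2, st.2 * 3))
    (0, 1)).1

-- ===== PRECONDITION & SPEC =====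
def Spec_zasifriraj_geslo (geslo_v_cistopisu : String) (out : Int) : Prop := out = zasifriraj_geslo_alt geslo_v_cistopisu
instance (geslo_v_cistopisu : String) (out : Int) : Decidable (Spec_zasifriraj_geslo geslo_v_cistopisu out) := by unfold Spec_zasifriraj_geslo; infer_instance

-- ===== CLAIM (what is proved, stated in full; the proofs are below) =====
def Claim_equal_zasifriraj_geslo : Prop := ∀ (geslo_v_cistopisu : String), Dom_zasifriraj_geslo geslo_v_cistopisu → Spec_zasifriraj_geslo geslo_v_cistopisu (zasifriraj_geslo geslo_v_cistopisu)

-- ===== LEMMAS AND PROOFS =====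

-- the per-character index both programs agree on
def pvIdx (c : Char) : Nat :=
  if PySem.Chars.isIn [c] pvZaporedje then (PySem.Chars.find pvZaporedje [c]).toNat
  else pvZaporedje.length - 1

-- A's sanitization of a single character
def pvPhi (c : Char) : Char := if PySem.Chars.isIn [c] pvZaporedje then c else 'ß'

-- the common value: Horner form of Σ 2^pvIdx cᵢ · 3^i
def pvT : List Char → Int
  | [] => 0
  | c :: l => 2 ^ pvIdx c + 3 * pvT l

-- same, with an abstract per-character weight
def pvTF (F : Char → Int) : List Char → Int
  | [] => 0
  | c :: l => F c + 3 * pvTF F l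

theorem pv_replace_go (a b : Char) :
    ∀ (fuel : Nat) (l acc : List Char), l.length ≤ fuel →
      PySem.Chars.replace.go [a] [b] fuel l acc
        = acc.reverse ++ l.map (fun c => if c = a then b else c) := by
  intro fuel
  induction fuel with
  | zero =>
    intro l acc h
    have : l = [] := List.eq_nil_of_length_eq_zero (Nat.le_zero.mp h)
    subst this
    simp [PySem.Chars.replace.go]
  | succ n ih =>
    intro l acc h
    cases l with
    | nil => simp [PySem.Chars.replace.go]
    | cons c t =>
      rw [PySem.Chars.replace.go]
      by_cases hc : c = a
      · subst hc
        simp only [List.isPrefixOf, BEq.rfl, Bool.and_true, List.length_cons,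
          List.length_nil, Nat.zero_add, List.drop_one, List.tail_cons, List.reverse_cons,
          List.reverse_nil, List.nil_append, List.isPrefixOf_nil_left, and_self, if_true]
        rw [List.singleton_append, ih t (b :: acc) (by simpa using Nat.succ_le_succ_iff.mp h)]
        simp
      · have hpf : [a].isPrefixOf (c :: t) = false := by
          simp [List.isPrefixOf]
          exact fun hh => absurd hh.symm hc
        rw [hpf]
        simp only [Bool.false_eq_true, if_false]
        rw [ih t (c :: acc) (by simpa using Nat.succ_le_succ_iff.mp h)]
        simp [hc]

theorem pv_replace_single (a b : Char) (s : List Char) :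
    PySem.Chars.replace s [a] [b] = s.map (fun c => if c = a then b else c) := by
  rw [PySem.Chars.replace]
  simp only [List.isEmpty_cons, Bool.false_eq_true, if_false]
  simpa using pv_replace_go a b s.length s [] le_rfl

-- A's sanitization loop computed as a map
theorem pv_foldA (l : List Char) : ∀ (acc : List Char),
    l.foldl (fun acc znak =>
      if PySem.Chars.isIn [znak] pvZaporedje then acc
      else PySem.Chars.replace acc [znak] ['ß']) acc
    = acc.map (fun c =>
        if PySem.Chars.isIn [c] pvZaporedje = false ∧ c ∈ l then 'ß' else c) := by
  induction l with
  | nil => intro acc; simp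
  | cons a t ih =>
    intro acc
    rw [List.foldl_cons]
    by_cases ha : PySem.Chars.isIn [a] pvZaporedje
    · rw [if_pos ha, ih]
      congr 1
      funext c
      by_cases hc : PySem.Chars.isIn [c] pvZaporedje
      · simp [hc]
      · have hca : c ≠ a := fun h => hc (h ▸ ha)
        simp [hc, hca]
    · rw [if_neg ha, pv_replace_single, ih, List.map_map]
      congr 1
      funext c
      by_cases hca : c = a
      · subst hca
        simp [ha, show PySem.Chars.isIn ['ß'] pvZaporedje = true from by decide]
      · simp [hca]

theorem pv_find_phi (c : Char) :
    (PySem.Chars.find pvZaporedje [pvPhi c]).toNat = pvIdx c := by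
  unfold pvPhi pvIdx
  by_cases hc : PySem.Chars.isIn [c] pvZaporedje
  · simp [hc]
  · simp only [hc, Bool.false_eq_true, if_false]
    decide

theorem pv_sum_range (F : Char → Int) (u : List Char) :
    ((List.range u.length).map (fun k => F (u.getD k ' ') * 3 ^ k)).sum = pvTF F u := by
  induction u with
  | nil => simp [pvTF]
  | cons c t ih =>
    rw [List.length_cons, List.range_succ_eq_map, List.map_cons, List.map_map, List.sum_cons]
    have : ((List.range t.length).map ((fun k => F ((c :: t).getD k ' ') * 3 ^ k) ∘ Nat.succ)).sum
        = 3 * ((List.range t.length).map (fun k => F (t.getD k ' ') * 3 ^ k)).sum := by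
      rw [← List.sum_map_mul_left]
      congr 1
      refine List.map_congr_left fun k _ => ?_
      simp only [Function.comp_apply, List.getD_cons_succ, pow_succ]
      ring
    rw [this, ih]
    simp [pvTF]

theorem pv_TF_map (F : Char → Int) (g : Char → Char) (l : List Char)
    (h : ∀ c ∈ l, F (g c) = (2 : Int) ^ pvIdx c) :
    pvTF F (l.map g) = pvT l := by
  induction l with
  | nil => simp [pvTF, pvT]
  | cons c t ih =>
    rw [List.map_cons]
    simp only [pvTF, pvT]
    rw [h c (List.mem_cons_self), ih (fun d hd => h d (List.mem_cons_of_mem _ hd))]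

theorem pv_foldB (l : List Char) : ∀ (t p : Int),
    (l.foldl (fun (st : Int × Int) znak =>
        let indeks : Nat :=
          if PySem.Chars.isIn [znak] pvZaporedje then (PySem.Chars.find pvZaporedje [znak]).toNat
          else pvZaporedje.length - 1
        (st.1 + 2 ^ indeks * st.2, st.2 * 3)) (t, p)).1
    = t + p * pvT l := by
  induction l with
  | nil => intro t p; simp [pvT]
  | cons c u ih =>
    intro t p
    rw [List.foldl_cons, ih]
    simp only [pvT, pvIdx]
    ring

theorem pv_A_eq (g : String) : zasifriraj_geslo g = pvT g.toList := by
  rw [zasifriraj_geslo]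
  rw [pv_foldA]
  set orig := g.toList with horig
  set G : Char → Char := fun c =>
    if PySem.Chars.isIn [c] pvZaporedje = false ∧ c ∈ orig then 'ß' else c with hG
  have hlen : PySem.List.len (orig.map G) = ((orig.length : Int)) := by
    simp [PySem.List.len_eq]
  rw [hlen, PySem.List.pyRange_zero_natCast, List.map_map]
  have hmap : ∀ k ∈ List.range orig.length,
      ((fun indeks_znaka =>
        (2 : Int) ^ (PySem.Chars.find pvZaporedje [PySem.List.pyGetD (orig.map G) indeks_znaka ' ']).toNat
          * 3 ^ indeks_znaka.toNat) ∘ (fun n : Nat => (n : Int))) k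
      = (fun c => (2 : Int) ^ (PySem.Chars.find pvZaporedje [c]).toNat) ((orig.map G).getD k ' ') * 3 ^ k := by
    intro k _
    simp [PySem.List.pyGetD_natCast]
  rw [List.map_congr_left hmap]
  have := pv_sum_range (fun c => (2 : Int) ^ (PySem.Chars.find pvZaporedje [c]).toNat) (orig.map G)
  rw [List.length_map] at this
  rw [this]
  apply pv_TF_map
  intro c hc
  have : G c = pvPhi c := by
    rw [hG, pvPhi]
    by_cases h : PySem.Chars.isIn [c] pvZaporedje <;> simp [h, hc]
  rw [this, pv_find_phi]

theorem pv_B_eq (g : String) : zasifriraj_geslo_alt g = pvT g.toList := by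
  rw [zasifriraj_geslo_alt]
  rw [pv_foldB]
  ring

-- ===== VERDICT (by name: the statement is the Claim_ definition above) =====
theorem zasifriraj_geslo_spec : Claim_equal_zasifriraj_geslo := by
  intro g _
  unfold Spec_zasifriraj_geslo
  rw [pv_A_eq, pv_B_eq]
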